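-- pv_equiv track=rewrite | github.com/far9100/far-coder | eval/swe_bench/locator.py | resolve_paths
-- ===== SOURCE A (Python) =====
-- def resolve_paths(suspects: list[str], all_files: list[str]) -> list[str]:
--     """Map each suspect string to an actual workspace file. Suffix-matches
--     (``models/deletion.py`` → ``django/db/models/deletion.py``); on tie,
--     keeps the shortest path. Returns paths in input order, deduplicated."""
--     resolved: list[str] = []
--     seen: set[str] = set()
--     file_set = set(all_files)
--     for sp in suspects:
--         match: str | None = None
--         if sp in file_set:
--             match = sp
--         else:
--             sfx = "/" + sp
--             candidates = [f for f in all_files if f == sp or f.endswith(sfx)]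
--             if candidates:
--                 match = min(candidates, key=len)
--         if match and match not in seen:
--             seen.add(match)
--             resolved.append(match)
--     return resolved
-- ===== SOURCE B (Python) =====
-- def resolve_paths(suspects: list[str], all_files: list[str]) -> list[str]:
--     """Same result as A, but one precomputed index: for every slash-boundary
--     suffix of every file, remember the shortest (first on tie) file having it;
--     each suspect is then a single dict lookup."""
--     best: dict[str, str] = {}
--     for f in all_files:
--         for s in [f] + [f[i + 1:] for i, c in enumerate(f) if c == "/"]:
--             b = best.get(s)
--             if b is None or len(f) < len(b):
--                 best[s] = f
--     resolved: list[str] = []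
--     seen: set[str] = set()
--     for sp in suspects:
--         m = best.get(sp)
--         if m and m not in seen:
--             seen.add(m)
--             resolved.append(m)
--     return resolved
-- ===== Notes on version B (the rewrite author's own statement) =====
-- stated objective: faster
-- what changed: Instead of scanning all files per suspect and taking min-by-length, B builds one dict mapping each slash-boundary suffix of each file to its shortest (first on tie) file, so each suspect is a single O(1) lookup.
import Mathlib
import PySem

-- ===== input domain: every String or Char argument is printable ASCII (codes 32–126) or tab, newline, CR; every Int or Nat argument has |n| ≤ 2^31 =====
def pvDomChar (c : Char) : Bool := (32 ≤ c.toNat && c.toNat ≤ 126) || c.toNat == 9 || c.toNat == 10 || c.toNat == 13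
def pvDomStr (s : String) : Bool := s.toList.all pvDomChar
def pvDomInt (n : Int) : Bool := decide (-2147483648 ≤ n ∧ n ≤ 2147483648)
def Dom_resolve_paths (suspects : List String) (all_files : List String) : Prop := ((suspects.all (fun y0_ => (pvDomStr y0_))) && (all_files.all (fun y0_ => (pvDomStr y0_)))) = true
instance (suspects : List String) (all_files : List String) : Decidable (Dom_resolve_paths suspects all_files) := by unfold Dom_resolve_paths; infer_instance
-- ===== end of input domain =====

-- B replaces A's per-suspect scan over all files by one precomputed suffix→shortest-file index (measured faster; return value proved equal).

-- ===== PORT A =====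
-- loop body of A's 'for sp in suspects' (state = (resolved, seen)); the match computation is A's if/else inline
def pvMatchA (all_files : List String) (file_set : PySem.Set String) (sp : String) : Option String :=
  if file_set.contains sp then some sp
  else
    let sfx := "/" ++ sp
    let candidates := all_files.filter (fun f => f == sp || PySem.Str.endswith f sfx)
    if candidates.isEmpty then none else PySem.List.min? candidates PySem.Str.len

def pvStepA (all_files : List String) (file_set : PySem.Set String)
    (st : List String × PySem.Set String) (sp : String) : List String × PySem.Set String :=
  match pvMatchA all_files file_set sp with
  | some m => if m ≠ "" && !(st.2.contains m) then (st.1 ++ [m], st.2.add m) else st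
  | none => st

def resolve_paths (suspects : List String) (all_files : List String) : List String :=
  let file_set : PySem.Set String := PySem.Set.ofList all_files
  (suspects.foldl (pvStepA all_files file_set) ([], PySem.Set.empty)).1

-- ===== PORT B =====
-- [f[i+1:] for i, c in enumerate(f) if c == "/"] — the suffix after each '/' of f (exact, ported by hand as a structural recursion)
def pvSlashSufs : List Char → List (List Char)
  | [] => []
  | c :: rest => if c = '/' then rest :: pvSlashSufs rest else pvSlashSufs rest

-- [f] + the slash suffixes, as B's inner loop iterates them
def pvSufs (f : String) : List String :=
  f :: (pvSlashSufs f.toList).map String.ofList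

-- B's inner loop body: best[s] = f if s absent or f shorter than best[s]
def pvUpd (best : PySem.Dict String String) (s f : String) : PySem.Dict String String :=
  match best.get? s with
  | none => best.insert s f
  | some b => if PySem.Str.len f < PySem.Str.len b then best.insert s f else best

-- B's first loop: the suffix → shortest (first on tie) file index
def pvBest (all_files : List String) : PySem.Dict String String :=
  all_files.foldl (fun best f => (pvSufs f).foldl (fun best s => pvUpd best s f) best) PySem.Dict.empty

-- B's second loop body
def pvStepB (best : PySem.Dict String String)
    (st : List String × PySem.Set String) (sp : String) : List String × PySem.Set String :=
  match best.get? sp with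
  | some m => if m ≠ "" && !(st.2.contains m) then (st.1 ++ [m], st.2.add m) else st
  | none => st

def resolve_paths_alt (suspects : List String) (all_files : List String) : List String :=
  let best := pvBest all_files
  (suspects.foldl (pvStepB best) ([], PySem.Set.empty)).1

-- ===== PRECONDITION & SPEC =====
def Spec_resolve_paths (suspects : List String) (all_files : List String) (out : List String) : Prop := out = resolve_paths_alt suspects all_files
instance (suspects : List String) (all_files : List String) (out : List String) : Decidable (Spec_resolve_paths suspects all_files out) := by unfold Spec_resolve_paths; infer_instance

-- ===== CLAIM (what is proved, stated in full; the proofs are below) =====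
def Claim_equal_resolve_paths : Prop := ∀ (suspects : List String) (all_files : List String), Dom_resolve_paths suspects all_files → Spec_resolve_paths suspects all_files (resolve_paths suspects all_files)

-- ===== LEMMAS AND PROOFS =====

-- A's candidate test
def pvCand (sp f : String) : Bool := f == sp || PySem.Str.endswith f ("/" ++ sp)

-- the fold step of PySem.List.min? with key PySem.Str.len
def pvMinStep (o : Option String) (f : String) : Option String :=
  match o with
  | none => some f
  | some b => if PySem.Str.len f < PySem.Str.len b then some f else some b

theorem mem_pvSlashSufs (l s : List Char) : s ∈ pvSlashSufs l ↔ ('/' :: s) <:+ l := by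
  induction l with
  | nil => simp [pvSlashSufs]
  | cons c rest ih =>
    simp only [pvSlashSufs]
    by_cases hc : c = '/'
    · subst hc
      rw [if_pos rfl, List.mem_cons, ih, List.suffix_cons_iff]
      constructor
      · rintro (rfl | h)
        · exact Or.inl rfl
        · exact Or.inr h
      · rintro (h | h)
        · injection h with _ h2
          exact Or.inl h2
        · exact Or.inr h
    · rw [if_neg hc, ih, List.suffix_cons_iff]
      constructor
      · exact Or.inr
      · rintro (h | h)
        · injection h with h1 _
          exact absurd h1.symm hc
        · exact h

theorem length_lt_of_mem_pvSlashSufs (l s : List Char) (h : s ∈ pvSlashSufs l) : s.length < l.length := by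
  have := ((mem_pvSlashSufs l s).mp h).length_le
  simpa using this

theorem nodup_pvSlashSufs (l : List Char) : (pvSlashSufs l).Nodup := by
  induction l with
  | nil => simp [pvSlashSufs]
  | cons c rest ih =>
    simp only [pvSlashSufs]
    split_ifs
    · exact List.nodup_cons.mpr ⟨fun h => absurd (length_lt_of_mem_pvSlashSufs rest rest h) (lt_irrefl _), ih⟩
    · exact ih

theorem pvOfList_inj : Function.Injective String.ofList := by
  intro a b h
  have := congrArg String.toList h
  simpa using this

theorem nodup_pvSufs (f : String) : (pvSufs f).Nodup := by
  refine List.nodup_cons.mpr ⟨?_, (nodup_pvSlashSufs f.toList).map pvOfList_inj⟩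
  intro hmem
  rcases List.mem_map.mp hmem with ⟨s, hs, heq⟩
  have : s = f.toList := by
    have := congrArg String.toList heq
    simpa using this
  subst this
  exact absurd (length_lt_of_mem_pvSlashSufs _ _ hs) (lt_irrefl _)

theorem pvEndswith_slash_iff (f sp : String) :
    PySem.Str.endswith f ("/" ++ sp) = true ↔ ('/' :: sp.toList) <:+ f.toList := by
  have h1 : ("/" ++ sp).toList = '/' :: sp.toList := by simp
  rw [PySem.Str.endswith, h1]
  exact PySem.Chars.endswith_iff _ _

theorem pvCand_iff (sp f : String) : pvCand sp f = true ↔ sp ∈ pvSufs f := by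
  simp only [pvCand, pvSufs, Bool.or_eq_true, beq_iff_eq, List.mem_cons, List.mem_map,
    pvEndswith_slash_iff, mem_pvSlashSufs]
  constructor
  · rintro (rfl | h)
    · exact Or.inl rfl
    · exact Or.inr ⟨sp.toList, h, by simp⟩
  · rintro (rfl | ⟨s, hs, rfl⟩)
    · exact Or.inl rfl
    · right
      simpa using hs

theorem get?_pvUpd (d : PySem.Dict String String) (s f k : String) :
    (pvUpd d s f).get? k = if k = s then pvMinStep (d.get? k) f else d.get? k := by
  cases h : d.get? s with
  | none =>
    have hu : pvUpd d s f = d.insert s f := by unfold pvUpd; rw [h]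
    rw [hu, PySem.Dict.get?_insert]
    by_cases hk : k = s
    · subst hk; simp [h, pvMinStep]
    · simp [hk]
  | some b =>
    have hu : pvUpd d s f = if PySem.Str.len f < PySem.Str.len b then d.insert s f else d := by
      unfold pvUpd; rw [h]
    by_cases hlt : PySem.Str.len f < PySem.Str.len b
    · rw [hu, if_pos hlt, PySem.Dict.get?_insert]
      by_cases hk : k = s
      · subst hk
        rw [if_pos rfl, if_pos rfl, h]
        simp only [pvMinStep]
        rw [if_pos hlt]
      · rw [if_neg hk, if_neg hk]
    · rw [hu, if_neg hlt]
      by_cases hk : k = s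
      · subst hk
        rw [if_pos rfl, h]
        simp only [pvMinStep]
        rw [if_neg hlt]
      · rw [if_neg hk]

theorem get?_foldl_pvUpd (L : List String) (f k : String) (hnd : L.Nodup) (d : PySem.Dict String String) :
    (L.foldl (fun best s => pvUpd best s f) d).get? k
      = if k ∈ L then pvMinStep (d.get? k) f else d.get? k := by
  induction L generalizing d with
  | nil => simp
  | cons s L ih =>
    have hnd' := List.nodup_cons.mp hnd
    simp only [List.foldl_cons]
    rw [ih hnd'.2, get?_pvUpd]
    by_cases hk : k = s
    · subst hk
      simp [hnd'.1]
    · simp [hk]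

theorem get?_pvBest_aux (fs : List String) (sp : String) (d : PySem.Dict String String) :
    (fs.foldl (fun best f => (pvSufs f).foldl (fun best s => pvUpd best s f) best) d).get? sp
      = fs.foldl (fun o f => if pvCand sp f then pvMinStep o f else o) (d.get? sp) := by
  induction fs generalizing d with
  | nil => rfl
  | cons f fs ih =>
    simp only [List.foldl_cons]
    rw [ih, get?_foldl_pvUpd _ _ _ (nodup_pvSufs f)]
    have hcond : (sp ∈ pvSufs f) = (pvCand sp f = true) := by
      simp [pvCand_iff]
    congr 1
    rw [if_congr (iff_of_eq hcond) rfl rfl]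

theorem min?_filter_eq (sp : String) (fs : List String) :
    PySem.List.min? (fs.filter (fun f => pvCand sp f)) PySem.Str.len
      = fs.foldl (fun o f => if pvCand sp f then pvMinStep o f else o) none := by
  unfold PySem.List.min?
  rw [List.foldl_filter]
  congr 1
  funext o f
  cases o <;> rfl

theorem get?_pvBest (fs : List String) (sp : String) :
    (pvBest fs).get? sp = PySem.List.min? (fs.filter (fun f => pvCand sp f)) PySem.Str.len := by
  rw [min?_filter_eq, pvBest, get?_pvBest_aux]
  rfl

theorem min?_filter_of_mem (fs : List String) (sp : String) (hmem : sp ∈ fs) :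
    PySem.List.min? (fs.filter (fun f => pvCand sp f)) PySem.Str.len = some sp := by
  have hsp : sp ∈ fs.filter (fun f => pvCand sp f) := by
    simp [List.mem_filter, hmem, pvCand]
  cases h : PySem.List.min? (fs.filter (fun f => pvCand sp f)) PySem.Str.len with
  | none =>
    rw [PySem.List.min?_eq_none_iff] at h
    rw [h] at hsp
    cases hsp
  | some m =>
    have hm := PySem.List.min?_mem h
    have hle := PySem.List.min?_isMin h sp hsp
    have hc : pvCand sp m = true := by
      have := (List.mem_filter.mp hm).2
      simpa using this
    simp only [pvCand, Bool.or_eq_true, beq_iff_eq] at hc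
    rcases hc with rfl | hc
    · rfl
    · exfalso
      have hsfx := (pvEndswith_slash_iff m sp).mp hc
      have hlen := hsfx.length_le
      simp only [List.length_cons] at hlen
      unfold PySem.Str.len at hle
      omega

theorem pvMatch_eq (fs : List String) (sp : String) :
    pvMatchA fs (PySem.Set.ofList fs) sp = (pvBest fs).get? sp := by
  rw [get?_pvBest]
  simp only [pvMatchA]
  have hfil : (fun f => f == sp || PySem.Str.endswith f ("/" ++ sp)) = (fun f => pvCand sp f) := rfl
  rw [hfil]
  by_cases hin : (PySem.Set.ofList fs).contains sp = true
  · rw [if_pos hin]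
    have hmem : sp ∈ fs := by
      have h1 : sp ∈ PySem.Set.ofList fs := by rw [← PySem.Set.contains_iff]; exact hin
      rwa [PySem.Set.mem_ofList] at h1
    exact (min?_filter_of_mem fs sp hmem).symm
  · rw [if_neg hin]
    by_cases he : (fs.filter (fun f => pvCand sp f)).isEmpty = true
    · rw [if_pos he, List.isEmpty_iff.mp he]
      rfl
    · rw [if_neg he]

theorem pvStep_eq (fs : List String) (st : List String × PySem.Set String) (sp : String) :
    pvStepA fs (PySem.Set.ofList fs) st sp = pvStepB (pvBest fs) st sp := by
  unfold pvStepA pvStepB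
  rw [pvMatch_eq]

-- ===== VERDICT (by name: the statement is the Claim_ definition above) =====
theorem resolve_paths_spec : Claim_equal_resolve_paths := by
  intro suspects all_files _
  simp only [Spec_resolve_paths, resolve_paths, resolve_paths_alt]
  have hstep : pvStepA all_files (PySem.Set.ofList all_files) = pvStepB (pvBest all_files) := by
    funext st sp
    exact pvStep_eq all_files st sp
  rw [hstep]
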